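-- pv_equiv track=rewrite | github.com/ld86/algo | uf/visualise.py | get_inverted
-- ===== SOURCE A (Python) =====
-- def get_inverted(nodes):
--     inverted = {}
--     for i,e in enumerate(nodes):
--         if i != e:
--             if e in inverted:
--                 inverted[e].append(i)
--             else:
--                 inverted[e] = [i]
--     return inverted
-- ===== SOURCE B (Python) =====
-- def get_inverted(nodes):
--     # No incremental grouping: precompute the mismatched pairs, dedup the keys
--     # in first-seen order, then build each value list by an independent scan per key.
--     pairs = [(i, e) for i, e in enumerate(nodes) if i != e]
--     keys, seen = [], set()
--     for i, e in pairs: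
--         if e not in seen:
--             seen.add(e)
--             keys.append(e)
--     return {e: [i for i, x in pairs if x == e] for e in keys}
-- ===== Notes on version B (the rewrite author's own statement) =====
-- stated objective: alternative
-- what changed: Drops A's single-pass dict accumulation (append-or-create per element) entirely: B precomputes the mismatched (i, e) pairs, dedups the keys in first-seen order via a set, then computes each key's value list by an independent scan of the pairs per key, trading A's O(n) incremental hash grouping for a scan-per-key strategy with no list mutation inside a dict.
import Mathlib
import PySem

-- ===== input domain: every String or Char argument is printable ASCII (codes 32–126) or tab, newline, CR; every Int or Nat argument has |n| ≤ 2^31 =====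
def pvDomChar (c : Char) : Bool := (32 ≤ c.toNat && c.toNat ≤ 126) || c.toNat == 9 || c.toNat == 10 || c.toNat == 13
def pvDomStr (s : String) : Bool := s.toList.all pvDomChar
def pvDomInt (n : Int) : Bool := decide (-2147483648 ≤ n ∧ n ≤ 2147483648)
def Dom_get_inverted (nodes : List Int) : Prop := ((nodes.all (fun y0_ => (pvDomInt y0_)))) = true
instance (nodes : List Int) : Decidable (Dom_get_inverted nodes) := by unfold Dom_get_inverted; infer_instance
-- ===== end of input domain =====

-- B replaces A's single-pass append-or-create dict accumulation with a pairs-precompute + key-dedup pass followed by an independent per-key scan; alternative decomposition, same return value.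


-- ===== PORT A =====
def get_inverted (nodes : List Int) : List (Int × List Int) :=
  ((PySem.List.enumerate nodes 0).foldl
    (fun d (p : Int × Int) =>
      if p.1 ≠ p.2 then
        match d.get? p.2 with
        | some l => d.insert p.2 (l ++ [p.1])
        | none => d.insert p.2 [p.1]
      else d)
    (PySem.Dict.empty : PySem.Dict Int (List Int))).items

-- ===== PORT B =====
def get_inverted_alt (nodes : List Int) : List (Int × List Int) :=
  let ps := PySem.List.enumerate nodes 0
  -- pairs = [(i, e) for i, e in enumerate(nodes) if i != e]
  let pairs := ps.filter (fun p => decide (p.1 ≠ p.2))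
  -- keys, seen = [], set(); for i, e in pairs: if e not in seen: seen.add(e); keys.append(e)
  let st := pairs.foldl
    (fun (st : List Int × PySem.Set Int) (p : Int × Int) =>
      if ¬ (PySem.Set.contains st.2 p.2 = true) then (st.1 ++ [p.2], PySem.Set.add st.2 p.2) else st)
    ([], PySem.Set.empty)
  -- {e: [i for i, x in pairs if x == e] for e in keys}
  (st.1.foldl
    (fun d e => d.insert e ((pairs.filter (fun q => q.2 == e)).map (·.1)))
    (PySem.Dict.empty : PySem.Dict Int (List Int))).items

-- ===== PRECONDITION & SPEC =====
def Spec_get_inverted (nodes : List Int) (out : List (Int × List Int)) : Prop := out = get_inverted_alt nodes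
instance (nodes : List Int) (out : List (Int × List Int)) : Decidable (Spec_get_inverted nodes out) := by unfold Spec_get_inverted; infer_instance

-- ===== CLAIM (what is proved, stated in full; the proofs are below) =====
def Claim_equal_get_inverted : Prop := ∀ (nodes : List Int), Dom_get_inverted nodes → Spec_get_inverted nodes (get_inverted nodes)

-- ===== LEMMAS AND PROOFS =====

-- A's accumulation loop
def pvAfold (ps : List (Int × Int)) : PySem.Dict Int (List Int) :=
  ps.foldl
    (fun d (p : Int × Int) =>
      if p.1 ≠ p.2 then
        match d.get? p.2 with
        | some l => d.insert p.2 (l ++ [p.1])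
        | none => d.insert p.2 [p.1]
      else d)
    PySem.Dict.empty

-- the keys, in first-seen order
def pvKeys (ps : List (Int × Int)) : List Int :=
  ps.foldl (fun ks (p : Int × Int) => if p.1 ≠ p.2 ∧ p.2 ∉ ks then ks ++ [p.2] else ks) []

-- the value list of key e
def pvIdxs (ps : List (Int × Int)) (e : Int) : List Int :=
  (ps.filter (fun q => decide (q.1 ≠ q.2) && (q.2 == e))).map (·.1)

theorem pvKeys_append_singleton (l : List (Int × Int)) (q : Int × Int) :
    pvKeys (l ++ [q]) = if q.1 ≠ q.2 ∧ q.2 ∉ pvKeys l then pvKeys l ++ [q.2] else pvKeys l := by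
  simp [pvKeys, List.foldl_append]

theorem pvIdxs_append_singleton (l : List (Int × Int)) (q : Int × Int) (e : Int) :
    pvIdxs (l ++ [q]) e = pvIdxs l e ++ (if q.1 ≠ q.2 ∧ q.2 = e then [q.1] else []) := by
  simp only [pvIdxs, List.filter_append, List.map_append]
  congr 1
  rcases q with ⟨a, b⟩
  by_cases h2 : b = e
  · subst h2
    by_cases h1 : a = b <;> simp [h1]
  · simp [h2]

theorem pvIdxs_nil_of_not_mem (l : List (Int × Int)) (e : Int) (h : e ∉ pvKeys l) :
    pvIdxs l e = [] := by
  induction l using List.reverseRecOn with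
  | nil => simp [pvIdxs]
  | append_singleton l q ih =>
    rw [pvKeys_append_singleton] at h
    rw [pvIdxs_append_singleton]
    split_ifs at h with hc
    · have he : e ∉ pvKeys l := fun hm => h (List.mem_append_left _ hm)
      have hne : q.2 ≠ e := by
        rintro rfl; exact h (List.mem_append_right _ (by simp))
      simp [ih he, hc.1, hne]
    · push Not at hc
      by_cases h1 : q.1 ≠ q.2
      · have : q.2 ∈ pvKeys l := by
          by_contra hmem; exact hmem (hc h1)
        by_cases h2 : q.2 = e
        · exact absurd (h2 ▸ this) h
        · simp [ih h, h1, h2]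
      · simp [ih h, h1]

theorem pvKeys_nodup (l : List (Int × Int)) : (pvKeys l).Nodup := by
  induction l using List.reverseRecOn with
  | nil => simp [pvKeys]
  | append_singleton l q ih =>
    rw [pvKeys_append_singleton]
    split_ifs with hc
    · exact List.Nodup.append ih (by simp) (by simpa using fun h => hc.2 h)
    · exact ih

theorem pvGet_map_shape (ks : List Int) (g : Int → List Int) (e : Int) :
    (PySem.Dict.mk (ks.map (fun k => (k, g k)))).get? e
      = if e ∈ ks then some (g e) else none := by
  induction ks with
  | nil => simp [PySem.Dict.get?]
  | cons k ks ih =>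
    rw [List.map_cons, PySem.Dict.get?_mk_cons]
    by_cases hk : k = e
    · subst hk; simp
    · simp [hk, ih, Ne.symm hk]

theorem pvContains_map_shape (ks : List Int) (g : Int → List Int) (e : Int) :
    (PySem.Dict.mk (ks.map (fun k => (k, g k)))).contains e = decide (e ∈ ks) := by
  rw [PySem.Dict.contains_eq_isSome_get?, pvGet_map_shape]
  split_ifs with h <;> simp [h]

-- A's dict, characterised
theorem pvAfold_items (ps : List (Int × Int)) :
    (pvAfold ps).items = (pvKeys ps).map (fun e => (e, pvIdxs ps e)) := by
  induction ps using List.reverseRecOn with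
  | nil => simp [pvAfold, pvKeys, PySem.Dict.empty]
  | append_singleton l q ih =>
    have hd : pvAfold l = PySem.Dict.mk ((pvKeys l).map (fun e => (e, pvIdxs l e))) := by
      apply PySem.Dict.ext; simpa using ih
    have hstep : pvAfold (l ++ [q]) =
        (if q.1 ≠ q.2 then
          match (pvAfold l).get? q.2 with
          | some v => (pvAfold l).insert q.2 (v ++ [q.1])
          | none => (pvAfold l).insert q.2 [q.1]
        else pvAfold l) := by
      simp [pvAfold, List.foldl_append]
    have hget : (pvAfold l).get? q.2 =
        if q.2 ∈ pvKeys l then some (pvIdxs l q.2) else none := by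
      rw [hd, pvGet_map_shape]
    by_cases h1 : q.1 ≠ q.2
    · by_cases h2 : q.2 ∈ pvKeys l
      · -- existing key: value updated in place
        rw [hstep, if_pos h1, hget, if_pos h2]
        have hcont : (pvAfold l).contains q.2 = true := by
          rw [PySem.Dict.contains_eq_isSome_get?, hget, if_pos h2]; rfl
        rw [PySem.Dict.items_insert_of_contains _ _ hcont, ih,
          pvKeys_append_singleton, if_neg (by tauto), List.map_map]
        apply List.map_congr_left
        intro k _
        by_cases hk : k = q.2
        · subst hk
          simp [pvIdxs_append_singleton, h1]
        · simp [pvIdxs_append_singleton, Function.comp, hk, Ne.symm hk]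
      · -- new key: appended at the end
        rw [hstep, if_pos h1, hget, if_neg h2]
        have hcont : (pvAfold l).contains q.2 = false := by
          rw [PySem.Dict.contains_eq_isSome_get?, hget, if_neg h2]; rfl
        rw [PySem.Dict.items_insert_of_not_contains _ _ hcont, ih,
          pvKeys_append_singleton, if_pos ⟨h1, h2⟩, List.map_append]
        congr 1
        · apply List.map_congr_left
          intro k hk
          have hne : q.2 ≠ k := fun h => h2 (h ▸ hk)
          simp [pvIdxs_append_singleton, hne]
        · simp [pvIdxs_append_singleton, h1, pvIdxs_nil_of_not_mem l q.2 h2]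
    · rw [hstep, if_neg h1, ih, pvKeys_append_singleton, if_neg (by tauto)]
      apply List.map_congr_left
      intro k _
      simp [pvIdxs_append_singleton, h1]

-- B's dict-comprehension fold over a nodup key list, characterised
theorem pvBuild_items (ks : List Int) (g : Int → List Int) (hnd : ks.Nodup) :
    (ks.foldl (fun d k => d.insert k (g k)) (PySem.Dict.empty : PySem.Dict Int (List Int))).items
      = ks.map (fun k => (k, g k)) := by
  induction ks using List.reverseRecOn with
  | nil => simp [PySem.Dict.empty]
  | append_singleton l k ih =>
    have hnl : l.Nodup := (List.nodup_append.mp hnd).1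
    have hk : k ∉ l := by
      intro hm
      rcases List.nodup_append.mp hnd with ⟨_, _, hdisj⟩
      exact hdisj k hm k (List.mem_singleton.mpr rfl) rfl
    have hd : l.foldl (fun d k => d.insert k (g k)) (PySem.Dict.empty : PySem.Dict Int (List Int))
        = PySem.Dict.mk (l.map (fun k => (k, g k))) := by
      apply PySem.Dict.ext; simpa using ih hnl
    have hcont : (l.foldl (fun d k => d.insert k (g k))
        (PySem.Dict.empty : PySem.Dict Int (List Int))).contains k = false := by
      rw [hd, pvContains_map_shape]; simpa using hk
    rw [List.foldl_append, List.foldl_cons, List.foldl_nil,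
      PySem.Dict.items_insert_of_not_contains _ _ hcont, ih hnl, List.map_append]
    simp

-- B's key loop over pairs with the seen-set threaded equals the plain membership fold
theorem pvKeysSet (l : List (Int × Int)) : ∀ (ks : List Int) (s : PySem.Set Int),
    (∀ x : Int, x ∈ s ↔ x ∈ ks) →
    (l.foldl
      (fun (st : List Int × PySem.Set Int) (p : Int × Int) =>
        if ¬ (PySem.Set.contains st.2 p.2 = true) then (st.1 ++ [p.2], PySem.Set.add st.2 p.2) else st)
      (ks, s)).1
    = l.foldl (fun ks (p : Int × Int) => if p.2 ∉ ks then ks ++ [p.2] else ks) ks := by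
  induction l with
  | nil => intro ks s _; rfl
  | cons p rest ih =>
    intro ks s hinv
    rw [List.foldl_cons, List.foldl_cons]
    by_cases hm : p.2 ∈ ks
    · have hc : PySem.Set.contains s p.2 = true := by
        simp only [PySem.Set.contains, List.contains_iff_mem]
        exact (hinv p.2).mpr hm
      rw [if_neg (not_not_intro hc), if_neg (by simpa using hm)]
      exact ih ks s hinv
    · have hc : ¬ PySem.Set.contains s p.2 = true := by
        simp only [PySem.Set.contains, List.contains_iff_mem]
        exact fun h => hm ((hinv p.2).mp h)
      rw [if_pos hc, if_pos hm]
      refine ih (ks ++ [p.2]) (PySem.Set.add s p.2) ?_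
      intro x
      rw [PySem.Set.mem_add]
      by_cases hx : x = p.2
      · subst hx; simp
      · simp [hx, hinv x]

-- pvKeys as a fold over the filtered pairs
theorem pvKeys_eq_filter_fold (ps : List (Int × Int)) :
    pvKeys ps
      = (ps.filter (fun p => decide (p.1 ≠ p.2))).foldl
          (fun ks (p : Int × Int) => if p.2 ∉ ks then ks ++ [p.2] else ks) [] := by
  rw [← PySem.List.foldl_if_eq_foldl_filter, pvKeys]
  rw [show (fun (ks : List Int) (p : Int × Int) => if p.1 ≠ p.2 ∧ p.2 ∉ ks then ks ++ [p.2] else ks)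
      = (fun (acc : List Int) (x : Int × Int) =>
          if (decide (x.1 ≠ x.2)) = true then (if x.2 ∉ acc then acc ++ [x.2] else acc) else acc) from by
    funext ks p
    by_cases h1 : p.1 ≠ p.2 <;> by_cases h2 : p.2 ∈ ks <;> simp [h1, h2]]

-- pvIdxs as a scan over the filtered pairs
theorem pvIdxs_eq_filter (ps : List (Int × Int)) (e : Int) :
    pvIdxs ps e
      = ((ps.filter (fun p => decide (p.1 ≠ p.2))).filter (fun q => q.2 == e)).map (·.1) := by
  rw [pvIdxs]
  congr 1
  rw [List.filter_filter]
  apply List.filter_congr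
  intro a _
  rw [Bool.and_comm]

-- ===== VERDICT (by name: the statement is the Claim_ definition above) =====
theorem get_inverted_spec : Claim_equal_get_inverted := by
  intro nodes _
  show get_inverted nodes = get_inverted_alt nodes
  have hA : get_inverted nodes
      = (pvKeys (PySem.List.enumerate nodes 0)).map
          (fun e => (e, pvIdxs (PySem.List.enumerate nodes 0) e)) :=
    pvAfold_items (PySem.List.enumerate nodes 0)
  have hkeys :
      (((PySem.List.enumerate nodes 0).filter (fun p => decide (p.1 ≠ p.2))).foldl
        (fun (st : List Int × PySem.Set Int) (p : Int × Int) =>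
          if ¬ (PySem.Set.contains st.2 p.2 = true) then (st.1 ++ [p.2], PySem.Set.add st.2 p.2) else st)
        ([], PySem.Set.empty)).1 = pvKeys (PySem.List.enumerate nodes 0) := by
    rw [pvKeysSet _ [] PySem.Set.empty (by intro x; simp [PySem.Set.empty]),
      pvKeys_eq_filter_fold]
  have hB : get_inverted_alt nodes
      = (pvKeys (PySem.List.enumerate nodes 0)).map
          (fun e => (e, pvIdxs (PySem.List.enumerate nodes 0) e)) := by
    show ((((PySem.List.enumerate nodes 0).filter (fun p => decide (p.1 ≠ p.2))).foldl
        (fun (st : List Int × PySem.Set Int) (p : Int × Int) =>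
          if ¬ (PySem.Set.contains st.2 p.2 = true) then (st.1 ++ [p.2], PySem.Set.add st.2 p.2) else st)
        ([], PySem.Set.empty)).1.foldl
        (fun d e => d.insert e
          ((((PySem.List.enumerate nodes 0).filter (fun p => decide (p.1 ≠ p.2))).filter
            (fun q => q.2 == e)).map (·.1)))
        (PySem.Dict.empty : PySem.Dict Int (List Int))).items = _
    rw [hkeys]
    rw [show (fun (d : PySem.Dict Int (List Int)) (e : Int) => d.insert e
        ((((PySem.List.enumerate nodes 0).filter (fun p => decide (p.1 ≠ p.2))).filter
          (fun q => q.2 == e)).map (·.1)))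
      = fun d e => d.insert e (pvIdxs (PySem.List.enumerate nodes 0) e) from by
        funext d e; rw [pvIdxs_eq_filter]]
    exact pvBuild_items _ _ (pvKeys_nodup _)
  rw [hA, hB]
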